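-- pv_equiv track=rewrite | github.com/subin3277/Algorithm_Py | programmers/level2/이진변환반복하기.py | solution
-- ===== SOURCE A (Python) =====
-- def solution(s):
--     answer = [0, 0]
--
--     while s != "1" :
--         ori_len = len(s)
--         s = s.replace("0", "")
--         new_len = len(s)
--         answer[0] += 1
--         answer[1] += ori_len-new_len
--         if new_len == 1 : break
--         tmp_s = new_len
--         new_s = ""
--         while tmp_s != 0:
--             new_s = str(tmp_s%2) + new_s
--             tmp_s //= 2
--         s = new_s
--
--     return answer
-- ===== SOURCE B (Python) =====
-- def _chain(n):
--     """Recursive list of the successive popcount values n, popcount(n), ... down to 1."""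
--     if n == 1:
--         return [1]
--     return [n] + _chain(bin(n).count("1"))
--
-- def solution(s):
--     # Two staged passes instead of a stateful rewrite loop: build the whole chain of
--     # surviving-'1'-counts recursively, then read steps/zeros off it by len/sum.
--     if s == "1":
--         return [0, 0]
--     ones = len(s) - s.count('0')
--     ch = _chain(ones)
--     zeros = len(s) - ones + sum(v.bit_length() - bin(v).count("1") for v in ch[:-1])
--     return [len(ch), zeros]
-- ===== Notes on version B (the rewrite author's own statement) =====
-- stated objective: alternative
-- what changed: B replaces A's stateful rewrite loop (repeatedly replacing '0's and rebuilding the binary string digit by digit) with two staged passes: a recursive function builds the whole chain of successive popcount values as a list, and the answer is then read off that list with len() and a sum over its elements.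
-- outside the precondition, e.g. on solution('0'): A does not finish within the time limit, B raises RecursionError; on solution('000'): A does not finish within the time limit, B raises RecursionError; on solution(''): A does not finish within the time limit, B raises RecursionError
import Mathlib
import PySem

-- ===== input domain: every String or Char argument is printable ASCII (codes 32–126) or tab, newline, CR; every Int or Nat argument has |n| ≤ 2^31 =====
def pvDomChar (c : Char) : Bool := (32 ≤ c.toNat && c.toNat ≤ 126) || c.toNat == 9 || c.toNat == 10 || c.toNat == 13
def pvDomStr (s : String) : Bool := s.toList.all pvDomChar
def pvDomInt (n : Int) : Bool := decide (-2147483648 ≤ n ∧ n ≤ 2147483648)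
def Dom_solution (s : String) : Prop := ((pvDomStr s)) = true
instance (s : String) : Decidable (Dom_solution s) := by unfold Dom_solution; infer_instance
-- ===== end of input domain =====

-- B replaces A's stateful rewrite loop by two staged passes: a recursive function
-- materialises the chain of successive popcount values as a list, and the answer is
-- read off that list with a length and a sum.

-- ===== PORT A =====
-- A's inner digit-extraction loop: while tmp_s != 0: new_s = str(tmp_s%2) + new_s; tmp_s //= 2
-- (tmp_s is a Python len(), hence a Nat; Nat division = Python // on nonnegatives)
def binA (tmp : Nat) (acc : List Char) : List Char :=
  if h : tmp = 0 then acc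
  else binA (tmp / 2) (PySem.Int.toChars ((tmp % 2 : Nat) : Int) ++ acc)
termination_by tmp
decreasing_by exact Nat.div_lt_self (Nat.pos_of_ne_zero h) (by omega)

-- A's outer while loop, fuel-bounded (fuel makes the recursion total; under
-- Pre_solution the fuel solution supplies is proved sufficient, so the 0-case is never hit)
def aLoop (fuel : Nat) (s : List Char) (a0 a1 : Int) : List Int :=
  match fuel with
  | 0 => [a0, a1]
  | fuel + 1 =>
    if s = ['1'] then [a0, a1]
    else
      let oriLen := s.length
      let s' := PySem.Chars.replace s ['0'] []
      let newLen := s'.length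
      let a0' := a0 + 1
      let a1' := a1 + ((oriLen : Int) - (newLen : Int))
      if newLen = 1 then [a0', a1']
      else aLoop fuel (binA newLen []) a0' a1'

def solution (s : String) : List Int := aLoop (s.toList.length + 2) s.toList 0 0

-- ===== PORT B =====
-- B's recursive _chain: if n == 1: return [1]; return [n] + _chain(bin(n).count('1'))
-- (fuel makes the recursion total; under Pre_solution the fuel solution_alt supplies
-- is proved sufficient, so the 0-case is never hit)
def chainB (fuel : Nat) (n : Nat) : List Nat :=
  match fuel with
  | 0 => []
  | fuel + 1 =>
    if n = 1 then [1]
    else n :: chainB fuel (PySem.Int.bitCount (n : Int))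

def solution_alt (s : String) : List Int :=
  if s.toList = ['1'] then [0, 0]
  else
    let l := s.toList
    let ones := l.length - PySem.Chars.count l ['0']
    let ch := chainB ones ones
    let zeros : Int :=
      ((l.length : Int) - (ones : Int)) +
        (PySem.List.slice ch none (some (-1))).foldl
          (fun (a : Int) (v : Nat) => a + ((PySem.Int.bitLength (v : Int) : Int) - (PySem.Int.bitCount (v : Int) : Int))) 0
    [(ch.length : Int), zeros]

-- ===== PRECONDITION & SPEC =====
-- Pre_ excludes exactly the strings with no character other than '0' (including ""),
-- on which Python A loops forever (and Python B's recursion does not terminate either).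
def Pre_solution (s : String) : Prop := (s.toList.any (fun c => c != '0')) = true
instance (s : String) : Decidable (Pre_solution s) := by unfold Pre_solution; infer_instance
def pvWitness_solution : String := "10"

def Spec_solution (s : String) (out : List Int) : Prop := out = solution_alt s
instance (s : String) (out : List Int) : Decidable (Spec_solution s out) := by unfold Spec_solution; infer_instance

-- ===== CLAIM (what is proved, stated in full; the proofs are below) =====
def Claim_equal_solution : Prop := ∀ (s : String), Dom_solution s → Pre_solution s → Spec_solution s (solution s)

-- ===== LEMMAS AND PROOFS =====

-- proof-side abbreviations for the two aggregates B reads off the chain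
def chSteps (m : Nat) : Int := ((chainB m m).length : Int)
def chZeros (m : Nat) : Int :=
  ((chainB m m).dropLast.map
    (fun (w : Nat) => ((PySem.Int.bitLength (w : Int) : Int) - (PySem.Int.bitCount (w : Int) : Int)))).sum

theorem bitCount_lt_self (m : Nat) (h : 2 ≤ m) : PySem.Int.bitCount (m : Int) < m := by
  induction m using Nat.strong_induction_on with
  | _ m ih =>
    rw [PySem.Int.bitCount_natCast (by omega : 0 < m)]
    by_cases h2 : 2 ≤ m / 2
    · have := ih (m / 2) (by omega) h2
      omega
    · have hm1 : m / 2 = 1 := by omega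
      rw [hm1]
      have : PySem.Int.bitCount ((1 : Nat) : Int) = 1 := by decide
      omega

theorem bitCount_pos (n : Nat) (h : 1 ≤ n) : 1 ≤ PySem.Int.bitCount (n : Int) := by
  induction n using Nat.strong_induction_on with
  | _ n ih =>
    rw [PySem.Int.bitCount_natCast (by omega : 0 < n)]
    by_cases h2 : n / 2 = 0
    · omega
    · have := ih (n / 2) (Nat.div_lt_self (by omega) (by omega)) (by omega)
      omega

theorem replace_go_filter (fuel : Nat) (l acc : List Char) (h : l.length ≤ fuel) :
    PySem.Chars.replace.go ['0'] [] fuel l acc = acc.reverse ++ l.filter (fun c => c != '0') := by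
  induction fuel generalizing l acc with
  | zero =>
    have : l = [] := by cases l <;> simp_all
    subst this; simp [PySem.Chars.replace.go]
  | succ fuel ih =>
    cases l with
    | nil => simp [PySem.Chars.replace.go]
    | cons c t =>
      by_cases hc : c = '0'
      · subst hc
        rw [show PySem.Chars.replace.go ['0'] [] (fuel + 1) ('0' :: t) acc =
              PySem.Chars.replace.go ['0'] [] fuel t acc from rfl]
        rw [ih t acc (by simpa using h)]
        simp
      · rw [PySem.Chars.replace.go,
          if_neg (by simp [List.isPrefixOf]; exact fun hh => hc hh.symm)]
        rw [ih t (c :: acc) (by simpa using h)]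
        simp [hc]

theorem replace_filter (l : List Char) :
    PySem.Chars.replace l ['0'] [] = l.filter (fun c => c != '0') := by
  rw [PySem.Chars.replace, if_neg (by decide)]
  exact replace_go_filter l.length l [] (le_refl _)

-- s.count('0') for a single-character needle is List.count
theorem count_go_count (fuel : Nat) (l : List Char) (acc : Nat) (h : l.length ≤ fuel) :
    PySem.Chars.count.go ['0'] fuel l acc = acc + l.count '0' := by
  induction fuel generalizing l acc with
  | zero =>
    have : l = [] := by cases l <;> simp_all
    subst this; simp [PySem.Chars.count.go]
  | succ fuel ih =>
    cases l with
    | nil => simp [PySem.Chars.count.go]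
    | cons c t =>
      by_cases hc : c = '0'
      · subst hc
        rw [show PySem.Chars.count.go ['0'] (fuel + 1) ('0' :: t) acc =
              PySem.Chars.count.go ['0'] fuel t (acc + 1) from rfl]
        rw [ih t (acc + 1) (by simpa using h)]
        simp [List.count_cons]
        omega
      · rw [PySem.Chars.count.go,
          if_neg (by simp [List.isPrefixOf]; exact fun hh => hc hh.symm)]
        rw [ih t acc (by simpa using h)]
        simp [List.count_cons, hc]

theorem count_zero_eq (l : List Char) : PySem.Chars.count l ['0'] = l.count '0' := by
  rw [PySem.Chars.count, if_neg (by decide)]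
  simpa using count_go_count l.length l 0 (le_refl _)

-- len(s) - s.count('0') is the length of A's filtered string
theorem sub_count_eq_filter (l : List Char) :
    l.length - l.count '0' = (l.filter (fun c => c != '0')).length := by
  induction l with
  | nil => simp
  | cons c t ih =>
    by_cases hc : c = '0'
    · subst hc
      simp [List.count_cons]
      omega
    · simp [List.count_cons, hc]
      have hle : t.count '0' ≤ t.length := List.count_le_length
      omega

theorem binA_acc (n : Nat) (acc : List Char) : binA n acc = binA n [] ++ acc := by
  induction n using Nat.strong_induction_on generalizing acc with
  | _ n ih =>
    by_cases h : n = 0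
    · rw [binA.eq_def n acc, binA.eq_def n [], dif_pos h, dif_pos h, List.nil_append]
    · have hlt := Nat.div_lt_self (Nat.pos_of_ne_zero h) one_lt_two
      rw [binA.eq_def n acc, binA.eq_def n [], dif_neg h, dif_neg h,
        ih _ hlt (PySem.Int.toChars ((n % 2 : Nat) : Int) ++ acc),
        ih _ hlt (PySem.Int.toChars ((n % 2 : Nat) : Int) ++ []),
        List.append_nil, List.append_assoc]

theorem binA_unfold (n : Nat) (h : n ≠ 0) :
    binA n [] = binA (n / 2) [] ++ PySem.Int.toChars ((n % 2 : Nat) : Int) := by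
  rw [binA.eq_def n [], dif_neg h, binA_acc, List.append_nil]

theorem binA_zero : binA 0 [] = [] := by rw [binA.eq_def]; rfl

theorem binA_length (n : Nat) (h : 1 ≤ n) :
    (binA n []).length = PySem.Int.bitLength (n : Int) := by
  induction n using Nat.strong_induction_on with
  | _ n ih =>
    rw [binA_unfold n (by omega), PySem.Int.bitLength_natCast (by omega : 0 < n),
      List.length_append]
    have hd : (PySem.Int.toChars ((n % 2 : Nat) : Int)).length = 1 := by
      rcases Nat.mod_two_eq_zero_or_one n with h' | h' <;> rw [h'] <;> decide
    rw [hd]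
    by_cases h2 : n / 2 = 0
    · rw [h2, binA_zero]
      have hb : PySem.Int.bitLength (((0 : Nat)) : Int) = 0 := by decide
      rw [hb]
      rfl
    · rw [ih (n / 2) (Nat.div_lt_self (by omega) (by omega)) (by omega)]

theorem binA_count (n : Nat) (h : 1 ≤ n) :
    ((binA n []).filter (fun c => c != '0')).length = PySem.Int.bitCount (n : Int) := by
  induction n using Nat.strong_induction_on with
  | _ n ih =>
    rw [binA_unfold n (by omega), PySem.Int.bitCount_natCast (by omega : 0 < n),
      List.filter_append, List.length_append]
    have hd : ((PySem.Int.toChars ((n % 2 : Nat) : Int)).filter (fun c => c != '0')).length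
        = n % 2 := by
      rcases Nat.mod_two_eq_zero_or_one n with h' | h' <;> rw [h'] <;> decide
    rw [hd]
    by_cases h2 : n / 2 = 0
    · rw [h2, binA_zero]
      have hb : PySem.Int.bitCount (((0 : Nat)) : Int) = 0 := by decide
      rw [hb]
      simp only [List.filter_nil, List.length_nil]
      omega
    · rw [ih (n / 2) (Nat.div_lt_self (by omega) (by omega)) (by omega)]
      omega

theorem bitLength_ge_two (n : Nat) (h : 2 ≤ n) : 2 ≤ PySem.Int.bitLength (n : Int) := by
  rw [PySem.Int.bitLength_natCast (by omega : 0 < n)]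
  have : 1 ≤ PySem.Int.bitLength ((n / 2 : Nat) : Int) := by
    rw [PySem.Int.bitLength_natCast (by omega : 0 < n / 2)]
    omega
  omega

theorem binA_ne_one (n : Nat) (h : 2 ≤ n) : binA n [] ≠ ['1'] := by
  intro hcontra
  have h1 := binA_length n (by omega)
  rw [hcontra] at h1
  simp at h1
  have := bitLength_ge_two n h
  omega

-- chainB does not depend on the fuel as long as it is at least n (n ≥ 1)
theorem chainB_irrel (n : Nat) (h : 1 ≤ n) :
    ∀ f g, n ≤ f → n ≤ g → chainB f n = chainB g n := by
  induction n using Nat.strong_induction_on with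
  | _ n ih =>
    intro f g hf hg
    obtain ⟨f', rfl⟩ : ∃ k, f = k + 1 := ⟨f - 1, by omega⟩
    obtain ⟨g', rfl⟩ : ∃ k, g = k + 1 := ⟨g - 1, by omega⟩
    by_cases h1 : n = 1
    · simp [chainB, h1]
    · have h2 : 2 ≤ n := by omega
      have hlt := bitCount_lt_self n h2
      have hpos := bitCount_pos n (by omega)
      rw [chainB, chainB, if_neg h1, if_neg h1,
        ih (PySem.Int.bitCount (n : Int)) hlt hpos f' g' (by omega) (by omega)]

theorem chainB_unfold (n : Nat) (h : 2 ≤ n) :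
    chainB n n = n :: chainB (PySem.Int.bitCount (n : Int)) (PySem.Int.bitCount (n : Int)) := by
  obtain ⟨n', rfl⟩ : ∃ k, n = k + 1 := ⟨n - 1, by omega⟩
  rw [chainB, if_neg (by omega)]
  have hlt := bitCount_lt_self (n' + 1) h
  have hpos := bitCount_pos (n' + 1) (by omega)
  rw [chainB_irrel (PySem.Int.bitCount (((n' + 1 : Nat)) : Int)) hpos n'
    (PySem.Int.bitCount (((n' + 1 : Nat)) : Int)) (by omega) (le_refl _)]

theorem chainB_one : chainB 1 1 = [1] := by decide

theorem chainB_ne_nil (n : Nat) (h : 1 ≤ n) : chainB n n ≠ [] := by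
  by_cases h1 : n = 1
  · subst h1; rw [chainB_one]; simp
  · rw [chainB_unfold n (by omega)]; simp

theorem chSteps_one : chSteps 1 = 1 := by decide

theorem chZeros_one : chZeros 1 = 0 := by decide

theorem chSteps_unfold (n : Nat) (h : 2 ≤ n) :
    chSteps n = 1 + chSteps (PySem.Int.bitCount (n : Int)) := by
  unfold chSteps
  rw [chainB_unfold n h]
  simp
  omega

theorem chZeros_unfold (n : Nat) (h : 2 ≤ n) :
    chZeros n = ((PySem.Int.bitLength (n : Int) : Int) - (PySem.Int.bitCount (n : Int) : Int))
      + chZeros (PySem.Int.bitCount (n : Int)) := by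
  unfold chZeros
  rw [chainB_unfold n h,
    List.dropLast_cons_of_ne_nil (chainB_ne_nil _ (bitCount_pos n (by omega))), List.map_cons,
    List.sum_cons]

-- the core correspondence: from the binary string of m (m ≥ 2), A's loop adds
-- chSteps/chZeros of the popcount chain starting below m
theorem aLoop_chain (m : Nat) (h2 : 2 ≤ m) :
    ∀ fuel a0 a1, m ≤ fuel →
      aLoop fuel (binA m []) a0 a1 =
        [a0 + chSteps (PySem.Int.bitCount (m : Int)),
         a1 + ((PySem.Int.bitLength (m : Int) : Int) - (PySem.Int.bitCount (m : Int) : Int))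
            + chZeros (PySem.Int.bitCount (m : Int))] := by
  induction m using Nat.strong_induction_on with
  | _ m ih =>
    intro fuel a0 a1 hfuel
    obtain ⟨fuel', rfl⟩ : ∃ k, fuel = k + 1 := ⟨fuel - 1, by omega⟩
    rw [aLoop, if_neg (binA_ne_one m h2)]
    simp only [replace_filter, binA_length m (by omega), binA_count m (by omega)]
    set C := PySem.Int.bitCount (m : Int) with hC
    have hCpos := bitCount_pos m (by omega)
    by_cases hC1 : C = 1
    · rw [if_pos hC1, hC1, chSteps_one, chZeros_one]
      norm_num
    · have hC2 : 2 ≤ C := by omega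
      rw [if_neg hC1]
      have hClt : C < m := by rw [hC]; exact bitCount_lt_self m h2
      rw [ih C hClt hC2 fuel' _ _ (by omega),
        chSteps_unfold C hC2, chZeros_unfold C hC2]
      simp only [List.cons.injEq, and_true]
      exact ⟨by ring, by ring⟩

-- B's foldl over the sliced chain is the chZeros sum
theorem foldl_sum_chain (l : List Nat) (a : Int) :
    l.foldl (fun (a : Int) (v : Nat) => a + ((PySem.Int.bitLength (v : Int) : Int) - (PySem.Int.bitCount (v : Int) : Int))) a
      = a + (l.map (fun (w : Nat) => ((PySem.Int.bitLength (w : Int) : Int) - (PySem.Int.bitCount (w : Int) : Int)))).sum := by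
  induction l generalizing a with
  | nil => simp
  | cons x t ih => simp [ih, add_assoc]

-- ===== VERDICT (by name: the statement is the Claim_ definition above) =====
theorem solution_spec : Claim_equal_solution := by
  intro s _hdom hpre
  unfold Spec_solution solution solution_alt
  set l := s.toList with hl
  by_cases h1 : l = ['1']
  · rw [if_pos h1, h1]
    decide
  · rw [if_neg h1]
    obtain ⟨c, hc, hc0⟩ : ∃ c ∈ l, c ≠ '0' := by
      unfold Pre_solution at hpre
      simpa using hpre
    have hm : 1 ≤ (l.filter (fun c => c != '0')).length := by
      have : c ∈ l.filter (fun c => c != '0') := by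
        rw [List.mem_filter]
        exact ⟨hc, by simpa using hc0⟩
      have := List.length_pos_of_mem this
      omega
    have hmlen : (l.filter (fun c => c != '0')).length ≤ l.length :=
      List.length_filter_le _ _
    have hones : l.length - PySem.Chars.count l ['0'] = (l.filter (fun c => c != '0')).length := by
      rw [count_zero_eq, sub_count_eq_filter]
    rw [aLoop, if_neg h1]
    simp only [replace_filter, hones, PySem.List.slice_to_neg_one, foldl_sum_chain]
    set m := (l.filter (fun c => c != '0')).length
    by_cases hm1 : m = 1
    · rw [if_pos hm1, hm1, chainB_one]
      norm_num
    · have hm2 : 2 ≤ m := by omega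
      rw [if_neg hm1,
        aLoop_chain m hm2 (l.length + 1) _ _ (by omega)]
      rw [show ((chainB m m).length : Int) = chSteps m from rfl]
      rw [chSteps_unfold m hm2]
      have hz : ((chainB m m).dropLast.map
          (fun (w : Nat) => ((PySem.Int.bitLength (w : Int) : Int) - (PySem.Int.bitCount (w : Int) : Int)))).sum
            = chZeros m := rfl
      rw [hz, chZeros_unfold m hm2]
      simp only [List.cons.injEq, and_true]
      exact ⟨by ring, by ring⟩
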